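-- pv_equiv track=rewrite | github.com/crnlchez1234-afk/godtier-debugger | src/utils/code_upgrade_system.py | _estimate_improvements
-- ===== SOURCE A (Python) =====
-- from typing import Dict, List, Any, Optional
--
-- def _estimate_improvements(suggestions: List[Dict[str, Any]]) -> Dict[str, str]:
--     """Estima mejoras potenciales"""
--     improvements = {
--         'reliability': '0%',
--         'maintainability': '0%',
--         'test_coverage': '0%',
--         'code_quality': '0%'
--     }
--
--     for sugg in suggestions:
--         pattern = sugg['pattern']
--         if pattern in ['error_handling', 'lazarus_protection']:
--             improvements['reliability'] = '30-50%'
--         elif pattern in ['darwin_evolution']: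
--             improvements['code_quality'] = '20-40%'
--         elif pattern in ['unit_testing']:
--             improvements['test_coverage'] = '40-60%'
--         elif pattern in ['type_annotations', 'logging_tracing']:
--             improvements['maintainability'] = '25-35%'
--
--     return improvements
-- ===== SOURCE B (Python) =====
-- from typing import Dict, List, Any
--
-- _RULES = [
--     ('reliability', {'error_handling', 'lazarus_protection'}, '30-50%'),
--     ('code_quality', {'darwin_evolution'}, '20-40%'),
--     ('test_coverage', {'unit_testing'}, '40-60%'),
--     ('maintainability', {'type_annotations', 'logging_tracing'}, '25-35%'),
-- ]
--
-- def _estimate_improvements(suggestions: List[Dict[str, Any]]) -> Dict[str, str]: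
--     """Estima mejoras potenciales"""
--     patterns = {sugg['pattern'] for sugg in suggestions}
--     improvements = {
--         'reliability': '0%',
--         'maintainability': '0%',
--         'test_coverage': '0%',
--         'code_quality': '0%'
--     }
--     for key, triggers, value in _RULES:
--         if triggers & patterns:
--             improvements[key] = value
--     return improvements
-- ===== Notes on version B (the rewrite author's own statement) =====
-- stated objective: alternative
-- what changed: B builds the set of present patterns once and then iterates over a fixed table of four category rules (trigger-set intersection), instead of A's per-suggestion loop with an if/elif chain; since each pattern sets a fixed value, traversal order is irrelevant.
import Mathlib
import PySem

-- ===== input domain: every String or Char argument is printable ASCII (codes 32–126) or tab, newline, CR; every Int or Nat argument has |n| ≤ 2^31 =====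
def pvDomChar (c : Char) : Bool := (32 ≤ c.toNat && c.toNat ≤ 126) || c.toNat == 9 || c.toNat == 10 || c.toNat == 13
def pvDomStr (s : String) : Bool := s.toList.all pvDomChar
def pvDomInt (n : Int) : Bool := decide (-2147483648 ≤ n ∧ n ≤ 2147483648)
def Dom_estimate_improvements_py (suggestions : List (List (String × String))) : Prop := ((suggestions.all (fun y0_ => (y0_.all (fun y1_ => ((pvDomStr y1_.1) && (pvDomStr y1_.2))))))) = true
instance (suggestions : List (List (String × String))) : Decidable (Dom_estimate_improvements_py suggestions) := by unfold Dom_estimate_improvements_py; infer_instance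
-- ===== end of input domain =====

-- B replaces A's per-suggestion if/elif loop by a pattern set built once plus a loop
-- over a fixed table of four category rules (objective: alternative decomposition).
-- sugg['pattern'] — first-match association-list lookup; total stand-in returns ""
-- when the key is absent (Python raises KeyError there; excluded by Pre_ below).
def pvPatternOf (sugg : List (String × String)) : String :=
  ((sugg.find? (fun p => p.1 == "pattern")).map (·.2)).getD ""

-- ===== PORT A =====
-- loop body of A, one suggestion: the if/elif chain
def pvStepA (imp : PySem.Dict String String) (sugg : List (String × String)) :
    PySem.Dict String String :=
  let pattern := pvPatternOf sugg
  if pattern = "error_handling" ∨ pattern = "lazarus_protection" then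
    imp.insert "reliability" "30-50%"
  else if pattern = "darwin_evolution" then
    imp.insert "code_quality" "20-40%"
  else if pattern = "unit_testing" then
    imp.insert "test_coverage" "40-60%"
  else if pattern = "type_annotations" ∨ pattern = "logging_tracing" then
    imp.insert "maintainability" "25-35%"
  else imp

def estimate_improvements_py (suggestions : List (List (String × String))) : List (String × String) :=
  let improvements : PySem.Dict String String :=
    PySem.Dict.mk [("reliability", "0%"), ("maintainability", "0%"),
                   ("test_coverage", "0%"), ("code_quality", "0%")]
  (suggestions.foldl pvStepA improvements).items

-- ===== PORT B =====
def pvRules : List (String × List String × String) :=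
  [("reliability", ["error_handling", "lazarus_protection"], "30-50%"),
   ("code_quality", ["darwin_evolution"], "20-40%"),
   ("test_coverage", ["unit_testing"], "40-60%"),
   ("maintainability", ["type_annotations", "logging_tracing"], "25-35%")]

def estimate_improvements_py_alt (suggestions : List (List (String × String))) : List (String × String) :=
  let patterns : PySem.Set String := PySem.Set.ofList (suggestions.map pvPatternOf)
  let improvements : PySem.Dict String String :=
    PySem.Dict.mk [("reliability", "0%"), ("maintainability", "0%"),
                   ("test_coverage", "0%"), ("code_quality", "0%")]
  (pvRules.foldl (fun imp rule =>
    if rule.2.1.any (fun t => PySem.Set.contains patterns t) then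
      imp.insert rule.1 rule.2.2
    else imp) improvements).items

-- ===== PRECONDITION & SPEC =====
-- Pre_ excludes exactly the inputs where some suggestion dict lacks the 'pattern'
-- key: there Python A (and B alike) raises KeyError.
def Pre_estimate_improvements_py (suggestions : List (List (String × String))) : Prop :=
  (suggestions.all (fun sugg => sugg.any (fun p => p.1 == "pattern"))) = true
instance (suggestions : List (List (String × String))) : Decidable (Pre_estimate_improvements_py suggestions) := by unfold Pre_estimate_improvements_py; infer_instance

def pvWitness_estimate_improvements_py : (List (List (String × String))) :=
  [[("pattern", "unit_testing")], [("pattern", "other"), ("x", "y")]]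

def Spec_estimate_improvements_py (suggestions : List (List (String × String))) (out : List (String × String)) : Prop := out = estimate_improvements_py_alt suggestions
instance (suggestions : List (List (String × String))) (out : List (String × String)) : Decidable (Spec_estimate_improvements_py suggestions out) := by unfold Spec_estimate_improvements_py; infer_instance

-- ===== CLAIM (what is proved, stated in full; the proofs are below) =====
def Claim_equal_estimate_improvements_py : Prop := ∀ (suggestions : List (List (String × String))), Dom_estimate_improvements_py suggestions → Pre_estimate_improvements_py suggestions → Spec_estimate_improvements_py suggestions (estimate_improvements_py suggestions)

-- ===== LEMMAS AND PROOFS =====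

-- whether some pattern in ps triggers each category
def hitR (ps : List String) : Bool := ps.any (fun p => p == "error_handling" || p == "lazarus_protection")
def hitC (ps : List String) : Bool := ps.any (fun p => p == "darwin_evolution")
def hitT (ps : List String) : Bool := ps.any (fun p => p == "unit_testing")
def hitM (ps : List String) : Bool := ps.any (fun p => p == "type_annotations" || p == "logging_tracing")

def mk4 (a b c d : String) : PySem.Dict String String :=
  PySem.Dict.mk [("reliability", a), ("maintainability", b), ("test_coverage", c), ("code_quality", d)]

theorem insert_mk4_R (a b c d v : String) : (mk4 a b c d).insert "reliability" v = mk4 v b c d := by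
  apply PySem.Dict.ext; simp [mk4, PySem.Dict.items_insert, PySem.Dict.contains]
theorem insert_mk4_M (a b c d v : String) : (mk4 a b c d).insert "maintainability" v = mk4 a v c d := by
  apply PySem.Dict.ext; simp [mk4, PySem.Dict.items_insert, PySem.Dict.contains]
theorem insert_mk4_T (a b c d v : String) : (mk4 a b c d).insert "test_coverage" v = mk4 a b v d := by
  apply PySem.Dict.ext; simp [mk4, PySem.Dict.items_insert, PySem.Dict.contains]
theorem insert_mk4_C (a b c d v : String) : (mk4 a b c d).insert "code_quality" v = mk4 a b c v := by
  apply PySem.Dict.ext; simp [mk4, PySem.Dict.items_insert, PySem.Dict.contains]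

-- A's loop, characterised: from any 4-key state it sets each slot iff some pattern hits it
theorem loopA_char (l : List (List (String × String))) :
    ∀ (a b c d : String),
    l.foldl pvStepA (mk4 a b c d) =
    mk4 (if hitR (l.map pvPatternOf) then "30-50%" else a)
        (if hitM (l.map pvPatternOf) then "25-35%" else b)
        (if hitT (l.map pvPatternOf) then "40-60%" else c)
        (if hitC (l.map pvPatternOf) then "20-40%" else d) := by
  induction l with
  | nil => intro a b c d; simp [hitR, hitM, hitT, hitC]
  | cons s l ih =>
    intro a b c d
    rw [List.foldl_cons, List.map_cons]
    by_cases h1 : pvPatternOf s = "error_handling" ∨ pvPatternOf s = "lazarus_protection"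
    · have hstep : pvStepA (mk4 a b c d) s = mk4 "30-50%" b c d := by
        unfold pvStepA; rw [if_pos h1, insert_mk4_R]
      rw [hstep, ih]
      rcases h1 with h | h <;> rw [h] <;>
        simp [hitR, hitM, hitT, hitC, ite_self]
    · by_cases h2 : pvPatternOf s = "darwin_evolution"
      · have hstep : pvStepA (mk4 a b c d) s = mk4 a b c "20-40%" := by
          unfold pvStepA; rw [if_neg h1, if_pos h2, insert_mk4_C]
        rw [hstep, ih, h2]
        simp [hitR, hitM, hitT, hitC, ite_self]
      · by_cases h3 : pvPatternOf s = "unit_testing"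
        · have hstep : pvStepA (mk4 a b c d) s = mk4 a b "40-60%" d := by
            unfold pvStepA; rw [if_neg h1, if_neg h2, if_pos h3, insert_mk4_T]
          rw [hstep, ih, h3]
          simp [hitR, hitM, hitT, hitC, ite_self]
        · by_cases h4 : pvPatternOf s = "type_annotations" ∨ pvPatternOf s = "logging_tracing"
          · have hstep : pvStepA (mk4 a b c d) s = mk4 a "25-35%" c d := by
              unfold pvStepA; rw [if_neg h1, if_neg h2, if_neg h3, if_pos h4, insert_mk4_M]
            rw [hstep, ih]
            rcases h4 with h | h <;> rw [h] <;>
              simp [hitR, hitM, hitT, hitC, ite_self]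
          · have hstep : pvStepA (mk4 a b c d) s = mk4 a b c d := by
              unfold pvStepA; rw [if_neg h1, if_neg h2, if_neg h3, if_neg h4]
            rw [hstep, ih]
            push Not at h1 h4
            have e1 : (pvPatternOf s == "error_handling") = false := by
              simp [h1.1]
            have e2 : (pvPatternOf s == "lazarus_protection") = false := by simp [h1.2]
            have e3 : (pvPatternOf s == "darwin_evolution") = false := by simp [h2]
            have e4 : (pvPatternOf s == "unit_testing") = false := by simp [h3]
            have e5 : (pvPatternOf s == "type_annotations") = false := by simp [h4.1]
            have e6 : (pvPatternOf s == "logging_tracing") = false := by simp [h4.2]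
            simp only [hitR, hitM, hitT, hitC, List.any_cons, e1, e2, e3, e4, e5, e6, Bool.false_or, Bool.or_self]
            rfl

-- B's trigger test over the deduplicated pattern set equals the hit predicates
theorem any_contains_ofList (ts ps : List String) :
    ts.any (fun t => PySem.Set.contains (PySem.Set.ofList ps) t) =
    ps.any (fun p => ts.any (fun t => p == t)) := by
  rw [Bool.eq_iff_iff]
  simp only [List.any_eq_true, PySem.Set.contains_eq_listContains,
    List.contains_iff_mem, PySem.Set.mem_ofList, beq_iff_eq]
  constructor
  · rintro ⟨t, ht, hp⟩; exact ⟨t, hp, t, ht, rfl⟩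
  · rintro ⟨p, hp, t, ht, he⟩; exact ⟨t, ht, he ▸ hp⟩

-- ===== VERDICT (by name: the statement is the Claim_ definition above) =====
theorem estimate_improvements_py_spec : Claim_equal_estimate_improvements_py := by
  intro suggestions _ _
  unfold Spec_estimate_improvements_py estimate_improvements_py estimate_improvements_py_alt
  simp only []
  rw [show (PySem.Dict.mk [("reliability", "0%"), ("maintainability", "0%"),
        ("test_coverage", "0%"), ("code_quality", "0%")]) = mk4 "0%" "0%" "0%" "0%" from rfl,
      loopA_char]
  simp only [pvRules, List.foldl_cons, List.foldl_nil, any_contains_ofList]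
  have hR : (suggestions.map pvPatternOf).any
      (fun p => ["error_handling", "lazarus_protection"].any (fun t => p == t)) =
      hitR (suggestions.map pvPatternOf) := by
    simp [hitR]
  have hC : (suggestions.map pvPatternOf).any
      (fun p => ["darwin_evolution"].any (fun t => p == t)) =
      hitC (suggestions.map pvPatternOf) := by
    simp [hitC]
  have hT : (suggestions.map pvPatternOf).any
      (fun p => ["unit_testing"].any (fun t => p == t)) =
      hitT (suggestions.map pvPatternOf) := by
    simp [hitT]
  have hM : (suggestions.map pvPatternOf).any
      (fun p => ["type_annotations", "logging_tracing"].any (fun t => p == t)) =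
      hitM (suggestions.map pvPatternOf) := by
    simp [hitM]
  rw [hR, hC, hT, hM]
  cases hr : hitR (suggestions.map pvPatternOf) <;>
    cases hc : hitC (suggestions.map pvPatternOf) <;>
      cases ht : hitT (suggestions.map pvPatternOf) <;>
        cases hm : hitM (suggestions.map pvPatternOf) <;>
          simp [mk4, PySem.Dict.items_insert, PySem.Dict.contains]
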